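-- pv_equiv track=rewrite | github.com/deeps2710/PALB1_Python-Programming | Lexicographically_largest_string_after_k_deletions.py | maxSubseq
-- ===== SOURCE A (Python) =====
-- def maxSubseq(s, k):
--     stack=[]
--     for ch in s:
--         while stack and k>0 and ch>stack[-1]:
--             stack.pop()
--             k-=1
--         stack.append(ch)
--
--     while k>0:
--         stack.pop()
--         k-=1
--
--     return ''.join(stack)
-- ===== SOURCE B (Python) =====
-- def maxSubseq(s, k):
--     # Repeated deletion: while budget remains, delete the character at the
--     # first strict ascent (chars[i] < chars[i+1]); if the string is already
--     # non-increasing, delete the last character.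
--     chars = list(s)
--     while k > 0:
--         i = 0
--         while i + 1 < len(chars) and chars[i] >= chars[i + 1]:
--             i += 1
--         if i + 1 < len(chars):
--             del chars[i]
--         else:
--             chars.pop()
--         k -= 1
--     return ''.join(chars)
-- ===== Notes on version B (the rewrite author's own statement) =====
-- stated objective: alternative
-- what changed: Replaces the single-pass monotonic stack with repeated single deletions: while budget remains, delete the character at the first strict ascent (or the last character if the string is non-increasing).
import Mathlib
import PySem

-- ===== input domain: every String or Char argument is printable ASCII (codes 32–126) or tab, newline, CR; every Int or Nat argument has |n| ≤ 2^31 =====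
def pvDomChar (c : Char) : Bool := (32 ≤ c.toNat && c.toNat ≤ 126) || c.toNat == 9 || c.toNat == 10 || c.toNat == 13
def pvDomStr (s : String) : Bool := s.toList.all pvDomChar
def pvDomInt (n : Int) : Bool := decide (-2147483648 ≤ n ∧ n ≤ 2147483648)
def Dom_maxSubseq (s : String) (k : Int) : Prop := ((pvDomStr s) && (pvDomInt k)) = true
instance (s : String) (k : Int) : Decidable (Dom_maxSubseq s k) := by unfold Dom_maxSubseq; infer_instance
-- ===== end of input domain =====

-- B deletes one character per budget unit (first strict ascent, else last char); A's value is matched exactly; the only difference is structure.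

-- ===== PORT A =====
-- the Python stack (append/pop at the right end) is represented reversed: list head = stack top
def pvPopWhile (ch : Char) : List Char → Int → List Char × Int
  | [], k => ([], k)
  | t :: rest, k => if k > 0 ∧ t < ch then pvPopWhile ch rest (k - 1) else (t :: rest, k)

def pvStep (acc : List Char × Int) (ch : Char) : List Char × Int :=
  let r := pvPopWhile ch acc.1 acc.2
  (ch :: r.1, r.2)

-- final 'while k>0: stack.pop()'; Python raises IndexError on an empty stack (excluded by Pre_)
def pvFinalPop : List Char → Int → List Char
  | [], _ => []
  | c :: r, k => if k > 0 then pvFinalPop r (k - 1) else c :: r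

def maxSubseq (s : String) (k : Int) : String :=
  let r := s.toList.foldl pvStep ([], k)
  String.mk (pvFinalPop r.1 r.2).reverse

-- ===== PORT B =====
-- delete the char at the first strict ascent; if none, delete the last char (pop on [] raises: excluded by Pre_)
def pvRemoveOne : List Char → List Char
  | [] => []
  | [_] => []
  | a :: b :: r => if a < b then b :: r else a :: pvRemoveOne (b :: r)

def pvRepDel (l : List Char) (k : Int) : List Char :=
  if 0 < k then pvRepDel (pvRemoveOne l) (k - 1) else l
termination_by k.toNat
decreasing_by omega

def maxSubseq_alt (s : String) (k : Int) : String := String.mk (pvRepDel s.toList k)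

-- ===== PRECONDITION & SPEC =====
-- Pre_ excludes exactly k > len(s), where Python A raises IndexError (Python B raises there too)
def Pre_maxSubseq (s : String) (k : Int) : Prop := k ≤ (s.length : Int)
instance (s : String) (k : Int) : Decidable (Pre_maxSubseq s k) := by unfold Pre_maxSubseq; infer_instance
def pvWitness_maxSubseq : String × Int := ("cbad", 2)

def Spec_maxSubseq (s : String) (k : Int) (out : String) : Prop := out = maxSubseq_alt s k
instance (s : String) (k : Int) (out : String) : Decidable (Spec_maxSubseq s k out) := by unfold Spec_maxSubseq; infer_instance

-- ===== CLAIM (what is proved, stated in full; the proofs are below) =====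
def Claim_equal_maxSubseq : Prop := ∀ (s : String) (k : Int), Dom_maxSubseq s k → Pre_maxSubseq s k → Spec_maxSubseq s k (maxSubseq s k)

-- ===== LEMMAS AND PROOFS =====

-- abbreviation for "non-increasing"
def pvNI (l : List Char) : Prop := List.IsChain (fun a b => b ≤ a) l

lemma popWhile_nonpos (ch : Char) (st : List Char) (k : Int) (hk : k ≤ 0) :
    pvPopWhile ch st k = (st, k) := by
  cases st with
  | nil => rfl
  | cons t r => simp only [pvPopWhile]; rw [if_neg]; rintro ⟨h, _⟩; omega

lemma popWhile_le (ch : Char) (st : List Char) (k : Int)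
    (h : ∀ t, st.head? = some t → ch ≤ t) : pvPopWhile ch st k = (st, k) := by
  cases st with
  | nil => rfl
  | cons t r =>
    simp only [pvPopWhile]; rw [if_neg]
    rintro ⟨_, hlt⟩
    exact absurd (h t rfl) (not_le.mpr hlt)

lemma fold_nonpos (l : List Char) (st : List Char) (k : Int) (hk : k ≤ 0) :
    l.foldl pvStep (st, k) = (l.reverse ++ st, k) := by
  induction l generalizing st with
  | nil => simp
  | cons x xs ih =>
    simp only [List.foldl_cons, pvStep, popWhile_nonpos x st k hk]
    rw [ih (x :: st)]
    simp

lemma fold_nopop (l : List Char) (st : List Char) (k : Int) (hni : pvNI l)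
    (h : ∀ x t, l.head? = some x → st.head? = some t → x ≤ t) :
    l.foldl pvStep (st, k) = (l.reverse ++ st, k) := by
  induction l generalizing st with
  | nil => simp
  | cons x xs ih =>
    have hx : pvPopWhile x st k = (st, k) := by
      apply popWhile_le
      intro t ht
      exact h x t rfl ht
    simp only [List.foldl_cons, pvStep, hx]
    rw [ih (x :: st) (List.IsChain.tail hni) ?_]
    · simp
    · intro y t hy ht
      simp only [List.head?_cons, Option.some.injEq] at ht
      subst ht
      exact (List.isChain_cons.mp hni).1 y hy

lemma finalPop_drop (st : List Char) (k : Int) : pvFinalPop st k = st.drop k.toNat := by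
  induction st generalizing k with
  | nil => simp [pvFinalPop]
  | cons c r ih =>
    simp only [pvFinalPop]
    by_cases hk : k > 0
    · rw [if_pos hk, ih]
      have : k.toNat = (k - 1).toNat + 1 := by omega
      rw [this]
      rfl
    · rw [if_neg hk]
      have : k.toNat = 0 := by omega
      simp [this]

lemma removeOne_NI (l : List Char) (h : pvNI l) : pvRemoveOne l = l.dropLast := by
  induction l with
  | nil => rfl
  | cons a t ih =>
    cases t with
    | nil => rfl
    | cons b r =>
      have hba : b ≤ a := (List.isChain_cons.mp h).1 b rfl
      simp only [pvRemoveOne]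
      rw [if_neg (not_lt.mpr hba), ih (List.IsChain.tail h)]
      rfl

lemma head?_eq_aux (p : List Char) (a b : Char) (r : List Char) :
    (p ++ [a]).head? = (p ++ a :: b :: r).head? := by
  cases p <;> simp

lemma removeOne_decomp (p : List Char) (a b : Char) (r : List Char)
    (hni : pvNI (p ++ [a])) (hab : a < b) :
    pvRemoveOne (p ++ a :: b :: r) = p ++ b :: r := by
  induction p with
  | nil => simp [pvRemoveOne, hab]
  | cons x p' ih =>
    obtain ⟨h, t, he⟩ : ∃ h t, p' ++ a :: b :: r = h :: t := by
      cases p' <;> exact ⟨_, _, rfl⟩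
    have hhead : (p' ++ [a]).head? = some h := by
      rw [head?_eq_aux p' a b r, he]; rfl
    have hxh : h ≤ x := by
      have := (List.isChain_cons.mp (by simpa using hni)).1
      exact this h hhead
    have hni' : pvNI (p' ++ [a]) := (List.isChain_cons.mp (by simpa using hni)).2
    calc pvRemoveOne ((x :: p') ++ a :: b :: r)
        = pvRemoveOne (x :: h :: t) := by rw [List.cons_append, he]
      _ = x :: pvRemoveOne (h :: t) := by
          simp only [pvRemoveOne]; rw [if_neg (not_lt.mpr hxh)]
      _ = x :: pvRemoveOne (p' ++ a :: b :: r) := by rw [he]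
      _ = x :: (p' ++ b :: r) := by rw [ih hni']
      _ = (x :: p') ++ b :: r := rfl

lemma fold_ascent (p : List Char) (a b : Char) (r : List Char) (k : Int)
    (hni : pvNI (p ++ [a])) (hab : a < b) (hk : 0 < k) :
    (p ++ a :: b :: r).foldl pvStep ([], k) = (p ++ b :: r).foldl pvStep ([], (k - 1)) := by
  have h1 : (p ++ [a]).foldl pvStep (([] : List Char), k) = ((p ++ [a]).reverse, k) := by
    rw [fold_nopop _ _ _ hni (by intro x t _ ht; simp at ht)]
    simp
  have h2 : p.foldl pvStep (([] : List Char), k - 1) = (p.reverse, k - 1) := by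
    rw [fold_nopop _ _ _ (List.IsChain.prefix hni ⟨[a], rfl⟩) (by intro x t _ ht; simp at ht)]
    simp
  have hpop : pvPopWhile b (a :: p.reverse) k = pvPopWhile b p.reverse (k - 1) := by
    simp only [pvPopWhile]; rw [if_pos ⟨hk, hab⟩]
  calc (p ++ a :: b :: r).foldl pvStep (([] : List Char), k)
      = ((p ++ [a]) ++ b :: r).foldl pvStep (([] : List Char), k) := by simp
    _ = (b :: r).foldl pvStep ((p ++ [a]).reverse, k) := by rw [List.foldl_append, h1]
    _ = r.foldl pvStep (pvStep ((a :: p.reverse), k) b) := by simp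
    _ = r.foldl pvStep (pvStep (p.reverse, k - 1) b) := by
        simp only [pvStep, hpop]
    _ = (b :: r).foldl pvStep (p.reverse, k - 1) := by simp
    _ = (p ++ b :: r).foldl pvStep (([] : List Char), k - 1) := by
        rw [List.foldl_append, h2]

lemma decomp (l : List Char) :
    pvNI l ∨ ∃ p a b r, l = p ++ a :: b :: r ∧ pvNI (p ++ [a]) ∧ a < b := by
  induction l with
  | nil => left; exact List.isChain_nil
  | cons x xs ih =>
    cases xs with
    | nil => left; simp [pvNI]
    | cons y t =>
      by_cases hxy : x < y
      · right
        exact ⟨[], x, y, t, rfl, by simp [pvNI], hxy⟩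
      · rcases ih with hni | ⟨p, a, b, r, heq, hni, hab⟩
        · left
          refine List.isChain_cons.mpr ⟨?_, hni⟩
          intro z hz
          simp only [List.head?_cons, Option.mem_def, Option.some.injEq] at hz
          subst hz
          exact not_lt.mp hxy
        · right
          refine ⟨x :: p, a, b, r, by rw [List.cons_append, heq], ?_, hab⟩
          have hhead : (p ++ [a]).head? = some y := by
            rw [head?_eq_aux p a b r, ← heq]; rfl
          rw [List.cons_append]
          refine List.isChain_cons.mpr ⟨?_, hni⟩
          intro z hz
          rw [hhead] at hz
          simp only [Option.mem_def, Option.some.injEq] at hz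
          subst hz
          exact not_lt.mp hxy

lemma repDel_NI (n : Nat) (k : Int) (l : List Char) (hn : k.toNat = n) (hni : pvNI l) :
    pvRepDel l k = l.take (l.length - k.toNat) := by
  induction n generalizing k l with
  | zero =>
    rw [pvRepDel, if_neg (by omega), hn]
    simp
  | succ m ih =>
    have hk : 0 < k := by omega
    rw [pvRepDel, if_pos hk, removeOne_NI l hni,
        ih (k - 1) _ (by omega) (List.IsChain.prefix hni l.dropLast_prefix)]
    rw [List.dropLast_eq_take, List.length_take, List.take_take]
    congr 1
    omega

-- A's whole computation as a list function
def runA (l : List Char) (k : Int) : List Char :=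
  let r := l.foldl pvStep ([], k)
  (pvFinalPop r.1 r.2).reverse

lemma main_lemma (n : Nat) (k : Int) (l : List Char) (hn : k.toNat = n)
    (hlen : k ≤ (l.length : Int)) : runA l k = pvRepDel l k := by
  induction n generalizing k l with
  | zero =>
    have hk : k ≤ 0 := by omega
    rw [runA, pvRepDel, if_neg (by omega)]
    simp only [fold_nonpos l [] k hk, List.append_nil]
    rw [finalPop_drop]
    have : k.toNat = 0 := by omega
    simp [this]
  | succ m ih =>
    have hk : 0 < k := by omega
    rcases decomp l with hni | ⟨p, a, b, r, heq, hni, hab⟩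
    · rw [runA]
      simp only [fold_nopop l [] k hni (by intro x t _ ht; simp at ht), List.append_nil]
      rw [finalPop_drop, repDel_NI (m + 1) k l hn hni]
      rw [List.reverse_drop, List.reverse_reverse, List.length_reverse]
    · subst heq
      have hre : runA (p ++ a :: b :: r) k = runA (p ++ b :: r) (k - 1) := by
        rw [runA, runA, fold_ascent p a b r k hni hab hk]
      have hrd : pvRepDel (p ++ a :: b :: r) k = pvRepDel (p ++ b :: r) (k - 1) := by
        rw [pvRepDel, if_pos hk, removeOne_decomp p a b r hni hab]
      rw [hre, hrd]
      apply ih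
      · omega
      · simp at hlen ⊢
        omega

-- ===== VERDICT (by name: the statement is the Claim_ definition above) =====
theorem maxSubseq_spec : Claim_equal_maxSubseq := by
  intro s k _hdom hpre
  have hlen : k ≤ (s.toList.length : Int) := by
    unfold Pre_maxSubseq at hpre
    rw [← String.length_toList] at hpre
    exact hpre
  have h := main_lemma k.toNat k s.toList rfl hlen
  show maxSubseq s k = maxSubseq_alt s k
  have hA : maxSubseq s k = String.mk (runA s.toList k) := rfl
  rw [hA, h]
  rfl
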